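-- pv_equiv track=rewrite | github.com/Bilmem2/ACMG_Assistant | acmg_assistant.py | calculate_ensemble_score
-- ===== SOURCE A (Python) =====
-- def calculate_ensemble_score(inputs, variant_type):
--     """Calculate ensemble score based on in silico predictions."""
--     damaging_count = 0
--     benign_count = 0
--
--     if variant_type == 'missense':
--         tools = ['revel', 'cadd', 'metarnn', 'clinpred', 'bayesdel', 'alphamissense', 'mutationtaster', 'polyphen2', 'sift', 'fathmm_xf', 'mutationassessor', 'provean', 'mutpred', 'metolr', 'esm1b', 'lrt', 'gerp']
--         for tool in tools:
--             prediction = inputs.get(f'{tool}_prediction', 'unknown')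
--             if prediction in ['damaging', 'likely_pathogenic', 'deleterious', 'conserved', 'high', 'medium']:
--                 damaging_count += 1
--             elif prediction in ['tolerated', 'likely_benign', 'neutral', 'non-conserved', 'low', 'polymorphism']:
--                 benign_count += 1
--     elif variant_type in ['splice_donor', 'splice_acceptor', 'intronic']:
--         for score_type in ['acceptor_gain', 'acceptor_loss', 'donor_gain', 'donor_loss']:
--             prediction = inputs.get(f'spliceai_{score_type}_prediction', 'unknown')
--             if prediction == 'damaging':
--                 damaging_count += 1
--             elif prediction == 'tolerated':
--                 benign_count += 1
--     elif variant_type in ['nonsense', 'frameshift']: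
--         prediction = inputs.get('loftool_prediction', 'unknown')
--         if prediction == 'damaging':
--             damaging_count += 1
--         elif prediction == 'tolerated':
--             benign_count += 1
--
--     for tool in ['phylop_vert', 'phylop_mamm', 'phylop_primate']:
--         prediction = inputs.get(f'{tool}_prediction', 'unknown')
--         if prediction == 'conserved':
--             damaging_count += 1
--         elif prediction == 'non-conserved':
--             benign_count += 1
--
--     return damaging_count, benign_count
-- ===== SOURCE B (Python) =====
-- MISSENSE_DAM = frozenset(['damaging', 'likely_pathogenic', 'deleterious', 'conserved', 'high', 'medium'])
-- MISSENSE_BEN = frozenset(['tolerated', 'likely_benign', 'neutral', 'non-conserved', 'low', 'polymorphism'])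
-- MISSENSE_KEYS = frozenset(t + '_prediction' for t in
--     ['revel', 'cadd', 'metarnn', 'clinpred', 'bayesdel', 'alphamissense', 'mutationtaster',
--      'polyphen2', 'sift', 'fathmm_xf', 'mutationassessor', 'provean', 'mutpred', 'metolr',
--      'esm1b', 'lrt', 'gerp'])
-- SPLICE_KEYS = frozenset('spliceai_' + s + '_prediction' for s in
--     ['acceptor_gain', 'acceptor_loss', 'donor_gain', 'donor_loss'])
-- PHYLOP_KEYS = frozenset(['phylop_vert_prediction', 'phylop_mamm_prediction', 'phylop_primate_prediction'])
--
--
-- def calculate_ensemble_score(inputs, variant_type):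
--     """Calculate ensemble score by a single pass over the provided predictions.
--
--     Instead of probing a fixed tool list with .get, walk the entries the caller
--     actually supplied and classify each one whose key is relevant for this
--     variant type; absent keys contribute nothing either way, so the counts agree.
--     """
--     damaging_count = 0
--     benign_count = 0
--     for key, value in inputs.items():
--         if key in PHYLOP_KEYS:
--             if value == 'conserved':
--                 damaging_count += 1
--             elif value == 'non-conserved':
--                 benign_count += 1
--         elif variant_type == 'missense' and key in MISSENSE_KEYS:
--             if value in MISSENSE_DAM:
--                 damaging_count += 1
--             elif value in MISSENSE_BEN:
--                 benign_count += 1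
--         elif variant_type in ('splice_donor', 'splice_acceptor', 'intronic') and key in SPLICE_KEYS:
--             if value == 'damaging':
--                 damaging_count += 1
--             elif value == 'tolerated':
--                 benign_count += 1
--         elif variant_type in ('nonsense', 'frameshift') and key == 'loftool_prediction':
--             if value == 'damaging':
--                 damaging_count += 1
--             elif value == 'tolerated':
--                 benign_count += 1
--     return damaging_count, benign_count
-- ===== Notes on version B (the rewrite author's own statement) =====
-- stated objective: alternative
-- what changed: Instead of probing a fixed list of tool keys with inputs.get and three separate per-variant-type counting loops, B makes one pass over the entries the caller actually supplied, classifying each entry whose key is relevant for the variant type (absent keys contribute nothing either way, so the counts agree).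
import Mathlib
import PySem

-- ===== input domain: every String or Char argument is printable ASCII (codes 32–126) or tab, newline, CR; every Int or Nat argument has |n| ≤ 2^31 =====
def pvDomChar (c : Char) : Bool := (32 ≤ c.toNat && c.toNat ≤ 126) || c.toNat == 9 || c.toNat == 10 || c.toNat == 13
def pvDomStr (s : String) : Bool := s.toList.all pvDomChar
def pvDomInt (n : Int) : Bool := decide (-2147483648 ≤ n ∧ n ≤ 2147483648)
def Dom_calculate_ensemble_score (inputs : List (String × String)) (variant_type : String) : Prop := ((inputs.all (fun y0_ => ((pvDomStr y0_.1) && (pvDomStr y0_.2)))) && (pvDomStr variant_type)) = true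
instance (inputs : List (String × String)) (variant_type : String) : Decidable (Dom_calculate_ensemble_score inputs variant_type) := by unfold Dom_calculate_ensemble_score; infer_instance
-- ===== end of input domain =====

-- B replaces A's probing of fixed tool-key lists with a single pass over the entries the
-- caller actually supplied, classifying each relevant key (alternative decomposition).

-- ===== PORT A =====
def calculate_ensemble_score (inputs : List (String × String)) (variant_type : String) : Int × Int :=
  let s : Int × Int :=
    if variant_type = "missense" then
      (["revel", "cadd", "metarnn", "clinpred", "bayesdel", "alphamissense", "mutationtaster",
        "polyphen2", "sift", "fathmm_xf", "mutationassessor", "provean", "mutpred", "metolr",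
        "esm1b", "lrt", "gerp"]).foldl (fun (s : Int × Int) tool =>
          let prediction := PySem.Dict.getD (PySem.Dict.mk inputs) (tool ++ "_prediction") "unknown"
          if prediction ∈ ["damaging", "likely_pathogenic", "deleterious", "conserved", "high", "medium"] then
            (s.1 + 1, s.2)
          else if prediction ∈ ["tolerated", "likely_benign", "neutral", "non-conserved", "low", "polymorphism"] then
            (s.1, s.2 + 1)
          else s) (0, 0)
    else if variant_type ∈ ["splice_donor", "splice_acceptor", "intronic"] then
      (["acceptor_gain", "acceptor_loss", "donor_gain", "donor_loss"]).foldl (fun (s : Int × Int) score_type =>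
          let prediction := PySem.Dict.getD (PySem.Dict.mk inputs) ("spliceai_" ++ score_type ++ "_prediction") "unknown"
          if prediction = "damaging" then (s.1 + 1, s.2)
          else if prediction = "tolerated" then (s.1, s.2 + 1)
          else s) (0, 0)
    else if variant_type ∈ ["nonsense", "frameshift"] then
      let prediction := PySem.Dict.getD (PySem.Dict.mk inputs) "loftool_prediction" "unknown"
      if prediction = "damaging" then ((1 : Int), (0 : Int))
      else if prediction = "tolerated" then (0, 1)
      else (0, 0)
    else (0, 0)
  (["phylop_vert", "phylop_mamm", "phylop_primate"]).foldl (fun (s : Int × Int) tool =>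
      let prediction := PySem.Dict.getD (PySem.Dict.mk inputs) (tool ++ "_prediction") "unknown"
      if prediction = "conserved" then (s.1 + 1, s.2)
      else if prediction = "non-conserved" then (s.1, s.2 + 1)
      else s) s

-- ===== PORT B =====
def MISSENSE_DAM : PySem.Set String :=
  PySem.Set.ofList ["damaging", "likely_pathogenic", "deleterious", "conserved", "high", "medium"]
def MISSENSE_BEN : PySem.Set String :=
  PySem.Set.ofList ["tolerated", "likely_benign", "neutral", "non-conserved", "low", "polymorphism"]
def MISSENSE_KEYS : PySem.Set String :=
  PySem.Set.ofList ((["revel", "cadd", "metarnn", "clinpred", "bayesdel", "alphamissense",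
    "mutationtaster", "polyphen2", "sift", "fathmm_xf", "mutationassessor", "provean",
    "mutpred", "metolr", "esm1b", "lrt", "gerp"]).map (fun t => t ++ "_prediction"))
def SPLICE_KEYS : PySem.Set String :=
  PySem.Set.ofList ((["acceptor_gain", "acceptor_loss", "donor_gain", "donor_loss"]).map
    (fun s => "spliceai_" ++ s ++ "_prediction"))
def PHYLOP_KEYS : PySem.Set String :=
  PySem.Set.ofList ["phylop_vert_prediction", "phylop_mamm_prediction", "phylop_primate_prediction"]

def calculate_ensemble_score_alt (inputs : List (String × String)) (variant_type : String) : Int × Int :=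
  (PySem.Dict.mk inputs).items.foldl (fun (s : Int × Int) kv =>
    if kv.1 ∈ PHYLOP_KEYS then
      if kv.2 = "conserved" then (s.1 + 1, s.2)
      else if kv.2 = "non-conserved" then (s.1, s.2 + 1)
      else s
    else if variant_type = "missense" ∧ kv.1 ∈ MISSENSE_KEYS then
      if kv.2 ∈ MISSENSE_DAM then (s.1 + 1, s.2)
      else if kv.2 ∈ MISSENSE_BEN then (s.1, s.2 + 1)
      else s
    else if variant_type ∈ ["splice_donor", "splice_acceptor", "intronic"] ∧ kv.1 ∈ SPLICE_KEYS then
      if kv.2 = "damaging" then (s.1 + 1, s.2)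
      else if kv.2 = "tolerated" then (s.1, s.2 + 1)
      else s
    else if variant_type ∈ ["nonsense", "frameshift"] ∧ kv.1 = "loftool_prediction" then
      if kv.2 = "damaging" then (s.1 + 1, s.2)
      else if kv.2 = "tolerated" then (s.1, s.2 + 1)
      else s
    else s) (0, 0)

-- ===== PRECONDITION & SPEC =====
-- Pre_ requires the association list to have pairwise-distinct keys: the Python argument is a
-- dict, which can never hold a duplicate key, so this excludes no input the Python A accepts.
def Pre_calculate_ensemble_score (inputs : List (String × String)) (variant_type : String) : Prop :=
  (inputs.map Prod.fst).Nodup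
instance (inputs : List (String × String)) (variant_type : String) : Decidable (Pre_calculate_ensemble_score inputs variant_type) := by unfold Pre_calculate_ensemble_score; infer_instance

def pvWitness_calculate_ensemble_score : (List (String × String)) × String :=
  ([("revel_prediction", "damaging"), ("phylop_vert_prediction", "conserved")], "missense")

def Spec_calculate_ensemble_score (inputs : List (String × String)) (variant_type : String) (out : Int × Int) : Prop := out = calculate_ensemble_score_alt inputs variant_type
instance (inputs : List (String × String)) (variant_type : String) (out : Int × Int) : Decidable (Spec_calculate_ensemble_score inputs variant_type out) := by unfold Spec_calculate_ensemble_score; infer_instance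

-- ===== CLAIM (what is proved, stated in full; the proofs are below) =====
def Claim_equal_calculate_ensemble_score : Prop := ∀ (inputs : List (String × String)) (variant_type : String), Dom_calculate_ensemble_score inputs variant_type → Pre_calculate_ensemble_score inputs variant_type → Spec_calculate_ensemble_score inputs variant_type (calculate_ensemble_score inputs variant_type)

-- ===== LEMMAS AND PROOFS =====

-- concrete key lists and per-key classifiers used to describe both programs as sums
def pvKMIS : List String :=
  ["revel_prediction", "cadd_prediction", "metarnn_prediction", "clinpred_prediction",
   "bayesdel_prediction", "alphamissense_prediction", "mutationtaster_prediction",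
   "polyphen2_prediction", "sift_prediction", "fathmm_xf_prediction",
   "mutationassessor_prediction", "provean_prediction", "mutpred_prediction",
   "metolr_prediction", "esm1b_prediction", "lrt_prediction", "gerp_prediction"]
def pvKSPL : List String :=
  ["spliceai_acceptor_gain_prediction", "spliceai_acceptor_loss_prediction",
   "spliceai_donor_gain_prediction", "spliceai_donor_loss_prediction"]
def pvKPHY : List String :=
  ["phylop_vert_prediction", "phylop_mamm_prediction", "phylop_primate_prediction"]

def pvCMis (v : String) : Int × Int :=
  if v ∈ ["damaging", "likely_pathogenic", "deleterious", "conserved", "high", "medium"] then (1, 0)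
  else if v ∈ ["tolerated", "likely_benign", "neutral", "non-conserved", "low", "polymorphism"] then (0, 1)
  else 0
def pvCTol (v : String) : Int × Int :=
  if v = "damaging" then (1, 0) else if v = "tolerated" then (0, 1) else 0
def pvCPhy (v : String) : Int × Int :=
  if v = "conserved" then (1, 0) else if v = "non-conserved" then (0, 1) else 0

def pvFmis (k v : String) : Int × Int := if k ∈ pvKPHY then pvCPhy v else pvCMis v
def pvFtol (k v : String) : Int × Int := if k ∈ pvKPHY then pvCPhy v else pvCTol v

lemma pv_foldl_eq_sum {α : Type} (f : Int × Int → α → Int × Int) (c : α → Int × Int)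
    (h : ∀ s x, f s x = s + c x) (l : List α) (s0 : Int × Int) :
    l.foldl f s0 = s0 + (l.map c).sum := by
  induction l generalizing s0 with
  | nil => simp
  | cons a t ih => simp [List.foldl_cons, ih, h, add_assoc]

lemma pv_sum_map_add {α : Type} (f g : α → Int × Int) (l : List α) :
    (l.map (fun x => f x + g x)).sum = (l.map f).sum + (l.map g).sum := by
  induction l with
  | nil => simp
  | cons a t ih => simp [ih]; abel

lemma pv_sum_single (inputs : List (String × String)) (k0 : String) (F : String → Int × Int)
    (hnd : (inputs.map Prod.fst).Nodup) (h0 : F "unknown" = 0) :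
    (inputs.map (fun kv => if kv.1 = k0 then F kv.2 else 0)).sum
      = F ((PySem.Dict.mk inputs).getD k0 "unknown") := by
  induction inputs with
  | nil => simp [PySem.Dict.getD, PySem.Dict.get?, h0]
  | cons a t ih =>
    have hnd' : (a.1 :: t.map Prod.fst).Nodup := by simpa using hnd
    have h1 : a.1 ∉ t.map Prod.fst := (List.nodup_cons.mp hnd').1
    have h2 : (t.map Prod.fst).Nodup := (List.nodup_cons.mp hnd').2
    have hget : (PySem.Dict.mk (a :: t)).getD k0 "unknown"
        = if a.1 = k0 then a.2 else (PySem.Dict.mk t).getD k0 "unknown" := by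
      rw [PySem.Dict.getD_eq_get?_getD, PySem.Dict.get?_mk_cons]
      by_cases h : a.1 = k0 <;> simp [h, PySem.Dict.getD_eq_get?_getD]
    rw [List.map_cons, List.sum_cons, hget]
    by_cases h : a.1 = k0
    · subst h
      have hz : (t.map (fun kv => if kv.1 = a.1 then F kv.2 else 0)).sum = 0 := by
        apply List.sum_eq_zero
        intro x hx
        simp only [List.mem_map] at hx
        obtain ⟨kv, hkv, rfl⟩ := hx
        have : kv.1 ≠ a.1 := fun he => h1 (he ▸ List.mem_map.mpr ⟨kv, hkv, rfl⟩)
        simp [this]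
      simp [hz]
    · simp [h, ih h2]

lemma pv_sum_keys (inputs : List (String × String)) (K : List String)
    (F : String → String → Int × Int) (hK : K.Nodup)
    (hnd : (inputs.map Prod.fst).Nodup) (hF : ∀ k ∈ K, F k "unknown" = 0) :
    (K.map (fun k => F k ((PySem.Dict.mk inputs).getD k "unknown"))).sum
      = (inputs.map (fun kv => if kv.1 ∈ K then F kv.1 kv.2 else 0)).sum := by
  induction K with
  | nil => simp
  | cons k0 K' ih =>
    simp only [List.nodup_cons] at hK
    have hsplit : ∀ kv : String × String,
        (if kv.1 ∈ k0 :: K' then F kv.1 kv.2 else 0)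
          = (if kv.1 = k0 then F k0 kv.2 else 0) + (if kv.1 ∈ K' then F kv.1 kv.2 else 0) := by
      intro kv
      by_cases e : kv.1 = k0
      · subst e; simp [hK.1]
      · by_cases m : kv.1 ∈ K' <;> simp [e, m]
    calc (((k0 :: K').map (fun k => F k ((PySem.Dict.mk inputs).getD k "unknown"))).sum)
        = F k0 ((PySem.Dict.mk inputs).getD k0 "unknown")
            + (K'.map (fun k => F k ((PySem.Dict.mk inputs).getD k "unknown"))).sum := by
          simp
      _ = (inputs.map (fun kv => if kv.1 = k0 then F k0 kv.2 else 0)).sum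
            + (inputs.map (fun kv => if kv.1 ∈ K' then F kv.1 kv.2 else 0)).sum := by
          rw [pv_sum_single inputs k0 (F k0) hnd (hF k0 (by simp)),
            ih hK.2 (fun k hk => hF k (by simp [hk]))]
      _ = (inputs.map (fun kv => if kv.1 ∈ k0 :: K' then F kv.1 kv.2 else 0)).sum := by
          rw [← pv_sum_map_add]
          exact (congrArg List.sum (List.map_congr_left (fun kv _ => (hsplit kv).symm)))

lemma pv_case_combine (inputs : List (String × String))
    (hnd : (inputs.map Prod.fst).Nodup) (K1 : List String) (C1 : String → Int × Int)
    (F : String → String → Int × Int)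
    (h1 : ∀ k ∈ K1, ∀ v, F k v = C1 v) (hphy : ∀ k ∈ pvKPHY, ∀ v, F k v = pvCPhy v)
    (hK : (K1 ++ pvKPHY).Nodup) (hF : ∀ k ∈ K1 ++ pvKPHY, F k "unknown" = 0) :
    ((K1.map (fun k => C1 ((PySem.Dict.mk inputs).getD k "unknown"))).sum
        + (pvKPHY.map (fun k => pvCPhy ((PySem.Dict.mk inputs).getD k "unknown"))).sum)
      = (inputs.map (fun kv => if kv.1 ∈ K1 ++ pvKPHY then F kv.1 kv.2 else 0)).sum := by
  have e1 : (K1.map (fun k => C1 ((PySem.Dict.mk inputs).getD k "unknown")))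
      = K1.map (fun k => F k ((PySem.Dict.mk inputs).getD k "unknown")) :=
    List.map_congr_left (fun k hk => (h1 k hk _).symm)
  have e2 : (pvKPHY.map (fun k => pvCPhy ((PySem.Dict.mk inputs).getD k "unknown")))
      = pvKPHY.map (fun k => F k ((PySem.Dict.mk inputs).getD k "unknown")) :=
    List.map_congr_left (fun k hk => (hphy k hk _).symm)
  rw [e1, e2, ← List.sum_append, ← List.map_append]
  exact pv_sum_keys inputs (K1 ++ pvKPHY) F hK hnd hF

def pvG (vt : String) (kv : String × String) : Int × Int :=
  if kv.1 ∈ pvKPHY then pvCPhy kv.2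
  else if vt = "missense" ∧ kv.1 ∈ pvKMIS then pvCMis kv.2
  else if vt ∈ ["splice_donor", "splice_acceptor", "intronic"] ∧ kv.1 ∈ pvKSPL then pvCTol kv.2
  else if vt ∈ ["nonsense", "frameshift"] ∧ kv.1 = "loftool_prediction" then pvCTol kv.2
  else 0

lemma pvB_eq_sum (inputs : List (String × String)) (vt : String) :
    calculate_ensemble_score_alt inputs vt = (0, 0) + (inputs.map (pvG vt)).sum := by
  unfold calculate_ensemble_score_alt
  have eP : PHYLOP_KEYS = pvKPHY := by decide
  have eM : MISSENSE_KEYS = pvKMIS := by decide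
  have eS : SPLICE_KEYS = pvKSPL := by decide
  have eD : MISSENSE_DAM = ["damaging", "likely_pathogenic", "deleterious", "conserved", "high", "medium"] := by decide
  have eB : MISSENSE_BEN = ["tolerated", "likely_benign", "neutral", "non-conserved", "low", "polymorphism"] := by decide
  refine pv_foldl_eq_sum _ _ ?_ _ _
  intro s kv
  rw [eP, eM, eS, eD, eB]
  unfold pvG pvCPhy pvCMis pvCTol
  split_ifs <;> simp_all [Prod.ext_iff]

-- ===== VERDICT (by name: the statement is the Claim_ definition above) =====
set_option maxHeartbeats 1000000 in
theorem calculate_ensemble_score_spec : Claim_equal_calculate_ensemble_score := by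
  intro inputs vt _dom pre
  have hnd : (inputs.map Prod.fst).Nodup := pre
  unfold Spec_calculate_ensemble_score
  rw [pvB_eq_sum]
  unfold calculate_ensemble_score
  have hphyfold : ∀ s0 : Int × Int,
      (["phylop_vert", "phylop_mamm", "phylop_primate"]).foldl (fun (s : Int × Int) tool =>
        let prediction := PySem.Dict.getD (PySem.Dict.mk inputs) (tool ++ "_prediction") "unknown"
        if prediction = "conserved" then (s.1 + 1, s.2)
        else if prediction = "non-conserved" then (s.1, s.2 + 1)
        else s) s0
      = s0 + ((["phylop_vert", "phylop_mamm", "phylop_primate"]).map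
          (fun t => pvCPhy (PySem.Dict.getD (PySem.Dict.mk inputs) (t ++ "_prediction") "unknown"))).sum := by
    intro s0
    refine pv_foldl_eq_sum _ _ ?_ _ _
    intro s x
    unfold pvCPhy
    split_ifs <;> simp_all [Prod.ext_iff]
  have hphymap : (["phylop_vert", "phylop_mamm", "phylop_primate"]).map
        (fun t => pvCPhy (PySem.Dict.getD (PySem.Dict.mk inputs) (t ++ "_prediction") "unknown"))
      = pvKPHY.map (fun k => pvCPhy (PySem.Dict.getD (PySem.Dict.mk inputs) k "unknown")) := rfl
  by_cases h1 : vt = "missense"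
  · subst h1
    rw [if_pos rfl]
    have hmisfold :
        (["revel", "cadd", "metarnn", "clinpred", "bayesdel", "alphamissense", "mutationtaster",
          "polyphen2", "sift", "fathmm_xf", "mutationassessor", "provean", "mutpred", "metolr",
          "esm1b", "lrt", "gerp"]).foldl (fun (s : Int × Int) tool =>
            let prediction := PySem.Dict.getD (PySem.Dict.mk inputs) (tool ++ "_prediction") "unknown"
            if prediction ∈ ["damaging", "likely_pathogenic", "deleterious", "conserved", "high", "medium"] then
              (s.1 + 1, s.2)
            else if prediction ∈ ["tolerated", "likely_benign", "neutral", "non-conserved", "low", "polymorphism"] then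
              (s.1, s.2 + 1)
            else s) ((0 : Int), (0 : Int))
        = ((0 : Int), (0 : Int)) + ((["revel", "cadd", "metarnn", "clinpred", "bayesdel", "alphamissense", "mutationtaster",
          "polyphen2", "sift", "fathmm_xf", "mutationassessor", "provean", "mutpred", "metolr",
          "esm1b", "lrt", "gerp"]).map
            (fun t => pvCMis (PySem.Dict.getD (PySem.Dict.mk inputs) (t ++ "_prediction") "unknown"))).sum := by
      refine pv_foldl_eq_sum _ _ ?_ _ _
      intro s x
      unfold pvCMis
      split_ifs <;> simp_all [Prod.ext_iff]
    have hmismap : (["revel", "cadd", "metarnn", "clinpred", "bayesdel", "alphamissense", "mutationtaster",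
          "polyphen2", "sift", "fathmm_xf", "mutationassessor", "provean", "mutpred", "metolr",
          "esm1b", "lrt", "gerp"]).map
            (fun t => pvCMis (PySem.Dict.getD (PySem.Dict.mk inputs) (t ++ "_prediction") "unknown"))
        = pvKMIS.map (fun k => pvCMis (PySem.Dict.getD (PySem.Dict.mk inputs) k "unknown")) := rfl
    rw [hphyfold, hmisfold, hphymap, hmismap]
    simp only [show (((0 : Int), (0 : Int)) : Int × Int) = 0 from rfl, zero_add]
    have hdisj : ∀ k ∈ pvKMIS, k ∉ pvKPHY := by decide
    have hGm : inputs.map (pvG "missense")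
        = inputs.map (fun kv => if kv.1 ∈ pvKMIS ++ pvKPHY then pvFmis kv.1 kv.2 else 0) := by
      refine List.map_congr_left (fun kv _ => ?_)
      by_cases p : kv.1 ∈ pvKPHY <;> by_cases m : kv.1 ∈ pvKMIS <;>
        simp [pvG, pvFmis, p, m, List.mem_append]
    rw [hGm]
    exact pv_case_combine inputs hnd pvKMIS pvCMis pvFmis
      (fun k hk v => by simp [pvFmis, hdisj k hk])
      (fun k hk v => by simp [pvFmis, hk])
      (by decide) (by decide)
  · rw [if_neg h1]
    by_cases h2 : vt ∈ (["splice_donor", "splice_acceptor", "intronic"] : List String)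
    · rw [if_pos h2]
      have h2' : vt = "splice_donor" ∨ vt = "splice_acceptor" ∨ vt = "intronic" := by simpa using h2
      have hn : vt ∉ (["nonsense", "frameshift"] : List String) := by
        rcases h2' with rfl | rfl | rfl <;> decide
      have hsplfold :
          (["acceptor_gain", "acceptor_loss", "donor_gain", "donor_loss"]).foldl (fun (s : Int × Int) score_type =>
              let prediction := PySem.Dict.getD (PySem.Dict.mk inputs) ("spliceai_" ++ score_type ++ "_prediction") "unknown"
              if prediction = "damaging" then (s.1 + 1, s.2)
              else if prediction = "tolerated" then (s.1, s.2 + 1)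
              else s) ((0 : Int), (0 : Int))
          = ((0 : Int), (0 : Int)) + ((["acceptor_gain", "acceptor_loss", "donor_gain", "donor_loss"]).map
              (fun t => pvCTol (PySem.Dict.getD (PySem.Dict.mk inputs) ("spliceai_" ++ t ++ "_prediction") "unknown"))).sum := by
        refine pv_foldl_eq_sum _ _ ?_ _ _
        intro s x
        unfold pvCTol
        split_ifs <;> simp_all [Prod.ext_iff]
      have hsplmap : (["acceptor_gain", "acceptor_loss", "donor_gain", "donor_loss"]).map
            (fun t => pvCTol (PySem.Dict.getD (PySem.Dict.mk inputs) ("spliceai_" ++ t ++ "_prediction") "unknown"))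
          = pvKSPL.map (fun k => pvCTol (PySem.Dict.getD (PySem.Dict.mk inputs) k "unknown")) := rfl
      rw [hphyfold, hsplfold, hphymap, hsplmap]
      simp only [show (((0 : Int), (0 : Int)) : Int × Int) = 0 from rfl, zero_add]
      have hdisj : ∀ k ∈ pvKSPL, k ∉ pvKPHY := by decide
      have hGm : inputs.map (pvG vt)
          = inputs.map (fun kv => if kv.1 ∈ pvKSPL ++ pvKPHY then pvFtol kv.1 kv.2 else 0) := by
        refine List.map_congr_left (fun kv _ => ?_)
        by_cases p : kv.1 ∈ pvKPHY <;> by_cases m : kv.1 ∈ pvKSPL <;>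
          simp [pvG, pvFtol, h1, h2, hn, p, m, List.mem_append]
      rw [hGm]
      exact pv_case_combine inputs hnd pvKSPL pvCTol pvFtol
        (fun k hk v => by simp [pvFtol, hdisj k hk])
        (fun k hk v => by simp [pvFtol, hk])
        (by decide) (by decide)
    · rw [if_neg h2]
      by_cases h3 : vt ∈ (["nonsense", "frameshift"] : List String)
      · rw [if_pos h3]
        have h3' : vt = "nonsense" ∨ vt = "frameshift" := by simpa using h3
        have hlof : (if PySem.Dict.getD (PySem.Dict.mk inputs) "loftool_prediction" "unknown" = "damaging" then ((1 : Int), (0 : Int))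
              else if PySem.Dict.getD (PySem.Dict.mk inputs) "loftool_prediction" "unknown" = "tolerated" then ((0 : Int), (1 : Int))
              else ((0 : Int), (0 : Int)))
            = ((["loftool_prediction"] : List String).map
                (fun k => pvCTol (PySem.Dict.getD (PySem.Dict.mk inputs) k "unknown"))).sum := by
          simp only [List.map_cons, List.map_nil, List.sum_cons, List.sum_nil, add_zero]
          unfold pvCTol
          split_ifs <;> rfl
        rw [hphyfold, hphymap, hlof]
        simp only [show (((0 : Int), (0 : Int)) : Int × Int) = 0 from rfl, zero_add]
        have hGm : inputs.map (pvG vt)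
            = inputs.map (fun kv => if kv.1 ∈ (["loftool_prediction"] : List String) ++ pvKPHY then pvFtol kv.1 kv.2 else 0) := by
          refine List.map_congr_left (fun kv _ => ?_)
          by_cases p : kv.1 ∈ pvKPHY <;> by_cases m : kv.1 = "loftool_prediction" <;>
            simp [pvG, pvFtol, h1, h2, h3, p, m]
        rw [hGm]
        exact pv_case_combine inputs hnd ["loftool_prediction"] pvCTol pvFtol
          (fun k hk v => by
            have hkk : k = "loftool_prediction" := by simpa using hk
            subst hkk
            have hnp : ("loftool_prediction" : String) ∉ pvKPHY := by decide
            simp [pvFtol, hnp])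
          (fun k hk v => by simp [pvFtol, hk])
          (by decide) (by decide)
      · rw [if_neg h3, hphyfold, hphymap]
        simp only [show (((0 : Int), (0 : Int)) : Int × Int) = 0 from rfl, zero_add]
        have hGm : inputs.map (pvG vt)
            = inputs.map (fun kv => if kv.1 ∈ ([] : List String) ++ pvKPHY then pvFtol kv.1 kv.2 else 0) := by
          refine List.map_congr_left (fun kv _ => ?_)
          by_cases p : kv.1 ∈ pvKPHY <;>
            simp [pvG, pvFtol, h1, h2, h3, p]
        rw [hGm]
        have := pv_case_combine inputs hnd [] pvCTol pvFtol
          (fun k hk v => by simp at hk)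
          (fun k hk v => by simp [pvFtol, hk])
          (by decide) (by decide)
        simpa using this
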